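-- pv_equiv track=rewrite | github.com/guptalab/GrayVT | VT Codes/Preposition_1/AllMapIntersection.py | countOnesAndZeros
-- ===== SOURCE A (Python) =====
-- def countOnesAndZeros(image):
--     ones = 0
--     zeros = 0
--     for i in image:
--         if i == '1':
--             ones += 1
--         else:
--             zeros += 1
--     return ones,zeros
-- ===== SOURCE B (Python) =====
-- def countOnesAndZeros(image):
--     # Divide and conquer: split the sequence in halves, tally each half
--     # recursively, and add the pair results.
--     def go(seg):
--         n = len(seg)
--         if n == 0:
--             return (0, 0)
--         if n == 1:
--             return (1, 0) if seg[0] == '1' else (0, 1)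
--         m = n // 2
--         o1, z1 = go(seg[:m])
--         o2, z2 = go(seg[m:])
--         return (o1 + o2, z1 + z2)
--     return go(image)
-- ===== Notes on version B (the rewrite author's own statement) =====
-- stated objective: alternative
-- what changed: Replaces A's single interleaved two-counter loop by a recursive divide-and-conquer that splits the string in halves, tallies each half recursively, and sums the resulting pairs.
import Mathlib
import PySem

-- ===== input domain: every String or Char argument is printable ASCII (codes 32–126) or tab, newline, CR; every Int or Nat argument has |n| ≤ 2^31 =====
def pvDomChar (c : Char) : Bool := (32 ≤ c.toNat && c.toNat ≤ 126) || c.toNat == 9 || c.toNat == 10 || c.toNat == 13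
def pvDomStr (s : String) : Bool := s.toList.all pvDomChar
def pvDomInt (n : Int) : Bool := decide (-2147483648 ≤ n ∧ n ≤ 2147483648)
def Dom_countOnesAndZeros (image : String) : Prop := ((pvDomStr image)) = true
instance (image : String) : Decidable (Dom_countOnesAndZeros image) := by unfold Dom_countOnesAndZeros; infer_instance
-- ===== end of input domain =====

-- B replaces A's single interleaved two-counter loop by a recursive divide-and-conquer
-- over string halves, summing the pair results (alternative decomposition).

-- ===== PORT A =====
-- for i in image: if i == '1': ones += 1 else: zeros += 1
def countOnesAndZeros (image : String) : Int × Int :=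
  let st := image.toList.foldl
    (fun (p : Int × Int) i => if i == '1' then (p.1 + 1, p.2) else (p.1, p.2 + 1))
    (0, 0)
  (st.1, st.2)

-- ===== PORT B =====
-- go(seg): empty -> (0,0); single char -> (1,0)/(0,1); else split at len//2 and add
def countOnesAndZerosGo (l : List Char) : Int × Int :=
  match l with
  | [] => (0, 0)
  | [c] => if c == '1' then (1, 0) else (0, 1)
  | a :: b :: rest =>
    let m := (a :: b :: rest).length / 2
    let p := countOnesAndZerosGo ((a :: b :: rest).take m)
    let q := countOnesAndZerosGo ((a :: b :: rest).drop m)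
    (p.1 + q.1, p.2 + q.2)
termination_by l.length
decreasing_by
  · simp only [List.length_take, List.length_cons]
    omega
  · simp only [List.length_drop, List.length_cons]
    omega

def countOnesAndZeros_alt (image : String) : Int × Int :=
  countOnesAndZerosGo image.toList

-- ===== PRECONDITION & SPEC =====
def Spec_countOnesAndZeros (image : String) (out : Int × Int) : Prop := out = countOnesAndZeros_alt image
instance (image : String) (out : Int × Int) : Decidable (Spec_countOnesAndZeros image out) := by unfold Spec_countOnesAndZeros; infer_instance

-- ===== CLAIM =====
def Claim_equal_countOnesAndZeros : Prop := ∀ (image : String), Dom_countOnesAndZeros image → Spec_countOnesAndZeros image (countOnesAndZeros image)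

-- ===== LEMMAS AND PROOFS =====

-- characterise A's one-pass fold: it accumulates the count of '1' and the count of the rest
theorem foldA (l : List Char) (a b : Int) :
    l.foldl (fun (p : Int × Int) i => if i == '1' then (p.1 + 1, p.2) else (p.1, p.2 + 1)) (a, b)
      = (a + l.count '1', b + ((l.length : Int) - l.count '1')) := by
  induction l generalizing a b with
  | nil => simp
  | cons h t ih =>
    simp only [List.foldl_cons]
    by_cases hc : h = '1'
    · simp only [hc, beq_self_eq_true, if_true, ih, List.count_cons, List.length_cons]
      refine Prod.ext ?_ ?_ <;> push_cast <;> ring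
    · have hb : (h == '1') = false := by simp [hc]
      simp only [if_false, Bool.false_eq_true, ih, List.count_cons, List.length_cons, hb]
      refine Prod.ext ?_ ?_ <;> push_cast <;> ring

-- characterise B's divide-and-conquer: it computes the same tallies
theorem goB_eq (l : List Char) :
    countOnesAndZerosGo l = ((l.count '1' : Int), (l.length : Int) - l.count '1') := by
  fun_induction countOnesAndZerosGo l with
  | case1 => simp
  | case2 c hc => simp_all
  | case3 c hc => simp_all
  | case4 a b rest m p q ihp ihq =>
    simp only [p, q, ihp, ihq]
    have hsplit := List.take_append_drop m (a :: b :: rest)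
    have hc : ((a :: b :: rest).take m).count '1' + ((a :: b :: rest).drop m).count '1'
        = (a :: b :: rest).count '1' := by rw [← List.count_append, hsplit]
    have hl : ((a :: b :: rest).take m).length + ((a :: b :: rest).drop m).length
        = (a :: b :: rest).length := by rw [← List.length_append, hsplit]
    refine Prod.ext ?_ ?_ <;> simp only [] <;> push_cast [← hc, ← hl] <;> ring

-- ===== VERDICT =====
theorem countOnesAndZeros_spec : Claim_equal_countOnesAndZeros := by
  intro image _
  unfold Spec_countOnesAndZeros countOnesAndZeros countOnesAndZeros_alt
  rw [foldA, goB_eq]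
  simp
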